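-- pv_equiv track=rewrite | github.com/arundhati08mishra/Python-practice | swap_even_consecutive.py | solve
-- ===== SOURCE A (Python) =====
-- def solve(nums):
-- 	prev = -1
-- 	for i in range(len(nums)):
-- 		if nums[i]%2 == 0:
-- 			if prev >= 0:
-- 				nums[i], nums[prev] = nums[prev], nums[i]
-- 				prev = -1
-- 			else:
-- 				prev = i
-- 	return nums
-- ===== SOURCE B (Python) =====
-- def solve(nums):
--     # Two-phase: build the index table of even elements, then walk it two entries at a time.
--     evens = [i for i, x in enumerate(nums) if x % 2 == 0]
--     k = 0
--     while k + 1 < len(evens):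
--         i, j = evens[k], evens[k + 1]
--         nums[i], nums[j] = nums[j], nums[i]
--         k += 2
--     return nums
-- ===== Notes on version B (the rewrite author's own statement) =====
-- stated objective: alternative
-- what changed: A's single pass with a prev-index state machine is replaced by two phases: first collect the indices of all even elements into a table, then walk that table two entries at a time swapping each pair in place.
import Mathlib
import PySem

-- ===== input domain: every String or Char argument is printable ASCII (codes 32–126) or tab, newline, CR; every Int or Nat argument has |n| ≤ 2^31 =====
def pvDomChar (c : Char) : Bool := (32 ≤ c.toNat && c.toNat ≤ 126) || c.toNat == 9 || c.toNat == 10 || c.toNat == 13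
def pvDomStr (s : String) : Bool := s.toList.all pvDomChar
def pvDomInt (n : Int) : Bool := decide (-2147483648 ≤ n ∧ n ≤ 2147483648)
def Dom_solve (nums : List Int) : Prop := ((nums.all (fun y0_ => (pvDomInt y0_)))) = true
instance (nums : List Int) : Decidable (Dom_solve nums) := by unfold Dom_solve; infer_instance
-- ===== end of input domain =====

-- B builds the index table of even elements first, then swaps pairs from it; A's prev-state single
-- pass is replaced by two phases. Both Pythons mutate nums in place identically and return it.

-- ===== PORT A =====
-- loop body of A's single pass: state = (current list, prev = index of unmatched even, or -1)
def stepA (st : List Int × Int) (i : Int) : List Int × Int :=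
  if PySem.Int.mod (PySem.List.pyGetD st.1 i 0) 2 = 0 then
    if 0 ≤ st.2 then
      (PySem.List.pySetD (PySem.List.pySetD st.1 i (PySem.List.pyGetD st.1 st.2 0)) st.2
        (PySem.List.pyGetD st.1 i 0), -1)
    else (st.1, i)
  else st

def solve (nums : List Int) : List Int :=
  ((PySem.List.pyRange 0 (nums.length : Int) 1).foldl stepA (nums, -1)).1

-- ===== PORT B =====
-- 'while k + 1 < len(evens): i, j = evens[k], evens[k+1]; nums[i], nums[j] = nums[j], nums[i]; k += 2'
def swapLoop (evens : List Int) (k : Nat) (nums : List Int) : List Int :=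
  if k + 1 < evens.length then
    let i := PySem.List.pyGetD evens (k : Int) 0
    let j := PySem.List.pyGetD evens ((k : Int) + 1) 0
    swapLoop evens (k + 2)
      (PySem.List.pySetD (PySem.List.pySetD nums i (PySem.List.pyGetD nums j 0)) j
        (PySem.List.pyGetD nums i 0))
  else nums
termination_by evens.length - k

def solve_alt (nums : List Int) : List Int :=
  swapLoop (((PySem.List.enumerate nums 0).filter (fun p => PySem.Int.mod p.2 2 == 0)).map (·.1))
    0 nums

-- ===== PRECONDITION & SPEC =====
def Spec_solve (nums : List Int) (out : List Int) : Prop := out = solve_alt nums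
instance (nums : List Int) (out : List Int) : Decidable (Spec_solve nums out) := by unfold Spec_solve; infer_instance

-- ===== CLAIM (what is proved, stated in full; the proofs are below) =====
def Claim_equal_solve : Prop := ∀ (nums : List Int), Dom_solve nums → Spec_solve nums (solve nums)

-- ===== LEMMAS AND PROOFS =====

-- indices (starting at position i) of the even elements of a suffix
def evIdx : List Int → Nat → List Nat
  | [], _ => []
  | x :: xs, i => if PySem.Int.mod x 2 = 0 then i :: evIdx xs (i + 1) else evIdx xs (i + 1)

-- common reference form of the pairwise swapping, on Nat indices
def pairSwap : List Int → List Nat → List Int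
  | xs, i :: j :: rest => pairSwap ((xs.set i (xs.getD j 0)).set j (xs.getD i 0)) rest
  | xs, _ => xs

-- B's phase 1 collects exactly evIdx
theorem evens_eq (xs : List Int) : ∀ s : Nat,
    (((PySem.List.enumerate xs (s : Int)).filter (fun p => PySem.Int.mod p.2 2 == 0)).map (·.1))
      = (evIdx xs s).map (fun (n : Nat) => (n : Int)) := by
  induction xs with
  | nil => intro s; simp [PySem.List.enumerate_nil, evIdx]
  | cons x xs ih =>
    intro s
    rw [PySem.List.enumerate_cons]
    have hih := ih (s + 1)
    push_cast at hih
    by_cases h : (2 : Int) ∣ x <;>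
      [skip; skip] <;>
      · simp [evIdx, h] at hih ⊢
        exact hih

-- B's phase 2 is pairSwap on the table's suffix from the cursor on
theorem swapLoop_eq (l : List Nat) : ∀ (k : Nat) (xs : List Int),
    swapLoop (l.map (fun (n : Nat) => (n : Int))) k xs = pairSwap xs (l.drop k) := by
  intro k
  induction hm : l.length - k using Nat.strong_induction_on generalizing k with
  | _ m ihm =>
  intro xs
  by_cases h : k + 1 < l.length
  · have hk : k < l.length := by omega
    have hk1 : k + 1 < l.length := h
    have hgk : PySem.List.pyGetD (l.map (fun (n : Nat) => (n : Int))) (k : Int) 0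
        = (l[k] : Int) := by
      rw [PySem.List.pyGetD_natCast, List.getD_eq_getElem _ _ (by simpa using hk)]
      simp
    have hgk1 : PySem.List.pyGetD (l.map (fun (n : Nat) => (n : Int))) ((k : Int) + 1) 0
        = (l[k + 1] : Int) := by
      rw [show ((k : Int) + 1) = ((k + 1 : Nat) : Int) by push_cast; ring,
        PySem.List.pyGetD_natCast, List.getD_eq_getElem _ _ (by simpa using hk1)]
      simp
    rw [swapLoop]
    rw [if_pos (by simpa using h)]
    simp only [hgk, hgk1, PySem.List.pySetD_natCast, PySem.List.pyGetD_natCast]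
    rw [ihm (l.length - (k + 2)) (by omega) (k + 2) rfl]
    rw [List.drop_eq_getElem_cons hk, List.drop_eq_getElem_cons hk1]
    simp only [pairSwap]
  · rw [swapLoop, if_neg (by simpa using h)]
    have hlen : (l.drop k).length ≤ 1 := by simp; omega
    rcases hd : l.drop k with _ | ⟨a, _ | ⟨b, t⟩⟩
    · rfl
    · rfl
    · rw [hd] at hlen; simp at hlen

-- A's single pass computes pairSwap of the remaining even indices (loop invariant)
theorem loopA (nums : List Int) :
    ∀ (suf : List Int) (i : Nat) (xs : List Int) (prev : Int),
      nums.drop i = suf →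
      xs.length = nums.length →
      (∀ k, i ≤ k → k < nums.length → xs.getD k 0 = nums.getD k 0) →
      (prev = -1 →
        ((PySem.List.pyRange (i : Int) (nums.length : Int) 1).foldl stepA (xs, prev)).1
          = pairSwap xs (evIdx suf i)) ∧
      (∀ p : Nat, prev = (p : Int) → p < i →
        ((PySem.List.pyRange (i : Int) (nums.length : Int) 1).foldl stepA (xs, prev)).1
          = pairSwap xs (p :: evIdx suf i)) := by
  intro suf
  induction suf with
  | nil =>
    intro i xs prev hdrop hlen hagree
    have hle : nums.length ≤ i := by
      by_contra h
      exact absurd hdrop (by simp [List.drop_eq_nil_iff]; omega)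
    rw [PySem.List.pyRange_one_eq_nil (by exact_mod_cast hle)]
    exact ⟨fun _ => rfl, fun p _ _ => rfl⟩
  | cons v rest ih =>
    intro i xs prev hdrop hlen hagree
    have hi : i < nums.length := by
      by_contra h
      rw [List.drop_eq_nil_iff.2 (by omega)] at hdrop
      simp at hdrop
    have hv : nums.getD i 0 = v := by
      have h0 : (nums.drop i)[0]? = some v := by rw [hdrop]; rfl
      rw [List.getElem?_drop] at h0
      simp only [Nat.add_zero] at h0
      simp [List.getD_eq_getElem?_getD, h0]
    have hdrop' : nums.drop (i + 1) = rest := by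
      have : nums.drop (i + 1) = (nums.drop i).drop 1 := by rw [List.drop_drop]
      rw [this, hdrop]; rfl
    have hxi : xs.getD i 0 = v := by rw [hagree i le_rfl hi, hv]
    rw [PySem.List.pyRange_one_cons (by exact_mod_cast hi)]
    have hcast : ((i : Int) + 1) = ((i + 1 : Nat) : Int) := by push_cast; ring
    have hg : PySem.List.pyGetD xs (i : Int) 0 = v := by
      rw [PySem.List.pyGetD_natCast]; exact hxi
    have hxi' : xs[i]?.getD 0 = v := by rw [← List.getD_eq_getElem?_getD]; exact hxi
    constructor
    · intro hprev; subst hprev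
      by_cases hv2 : (2 : Int) ∣ v
      · have hc : PySem.Int.mod (PySem.List.pyGetD xs (i : Int) 0) 2 = 0 := by
          rw [hg, PySem.Int.mod_eq_zero_iff_dvd]; exact hv2
        have hstep : stepA (xs, (-1 : Int)) (i : Int) = (xs, (i : Int)) := by
          simp only [stepA]
          rw [if_pos hc, if_neg (by decide : ¬ (0 : Int) ≤ -1)]
        rw [List.foldl_cons, hstep, hcast]
        have := (ih (i + 1) xs (i : Int) hdrop' hlen
          (fun k hk hk2 => hagree k (by omega) hk2)).2 i rfl (by omega)
        rw [this]
        simp [evIdx, hv2]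
      · have hc : ¬ PySem.Int.mod (PySem.List.pyGetD xs (i : Int) 0) 2 = 0 := by
          rw [hg, PySem.Int.mod_eq_zero_iff_dvd]; exact hv2
        have hstep : stepA (xs, (-1 : Int)) (i : Int) = (xs, -1) := by
          simp only [stepA]
          rw [if_neg hc]
        rw [List.foldl_cons, hstep, hcast]
        have := (ih (i + 1) xs (-1) hdrop' hlen
          (fun k hk hk2 => hagree k (by omega) hk2)).1 rfl
        rw [this]
        simp [evIdx, hv2]
    · intro p hprev hpi; subst hprev
      by_cases hv2 : (2 : Int) ∣ v
      · have hstep : stepA (xs, (p : Int)) (i : Int)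
            = ((xs.set i (xs.getD p 0)).set p (xs.getD i 0), -1) := by
          have hc : PySem.Int.mod (PySem.List.pyGetD xs (i : Int) 0) 2 = 0 := by
            rw [hg, PySem.Int.mod_eq_zero_iff_dvd]; exact hv2
          simp only [stepA]
          rw [if_pos hc, if_pos (Int.natCast_nonneg p)]
          simp only [PySem.List.pyGetD_natCast, PySem.List.pySetD_natCast]
        rw [List.foldl_cons, hstep, hcast]
        set xs' := (xs.set i (xs.getD p 0)).set p (xs.getD i 0) with hxs'
        have hlen' : xs'.length = nums.length := by simp [hxs', hlen]
        have hagree' : ∀ k, i + 1 ≤ k → k < nums.length → xs'.getD k 0 = nums.getD k 0 := by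
          intro k hk hk2
          have h1 : xs'.getD k 0 = xs.getD k 0 := by
            simp only [hxs', List.getD_eq_getElem?_getD]
            rw [List.getElem?_set_ne (by omega), List.getElem?_set_ne (by omega)]
          rw [h1, hagree k (by omega) hk2]
        have := (ih (i + 1) xs' (-1) hdrop' hlen' hagree').1 rfl
        rw [this]
        have hne : p ≠ i := by omega
        simp only [evIdx, PySem.Int.mod_eq_zero_iff_dvd, hv2, if_pos, pairSwap]
        rw [List.set_comm _ _ hne]
      · have hc : ¬ PySem.Int.mod (PySem.List.pyGetD xs (i : Int) 0) 2 = 0 := by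
          rw [hg, PySem.Int.mod_eq_zero_iff_dvd]; exact hv2
        have hstep : stepA (xs, (p : Int)) (i : Int) = (xs, (p : Int)) := by
          simp only [stepA]
          rw [if_neg hc]
        rw [List.foldl_cons, hstep, hcast]
        have := (ih (i + 1) xs (p : Int) hdrop' hlen
          (fun k hk hk2 => hagree k (by omega) hk2)).2 p rfl (by omega)
        rw [this]
        simp [evIdx, hv2]

-- ===== VERDICT (by name: the statement is the Claim_ definition above) =====
theorem solve_spec : Claim_equal_solve := by
  intro nums _
  unfold Spec_solve solve solve_alt
  have he := evens_eq nums 0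
  have hl := (loopA nums nums 0 nums (-1) rfl rfl (fun _ _ _ => rfl)).1 rfl
  rw [Nat.cast_zero] at he hl
  rw [he, swapLoop_eq]
  exact hl
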